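-- pv_equiv track=rewrite | github.com/xinwenir/Muon_Imaging_Algorithm | InvSolver/old_solver/solver_constrain_in_papage/Main.py | simplify_value
-- ===== SOURCE A (Python) =====
-- def simplify_value(vi, vj, unneed_j,value):
--     """
--     删除vj中不需要的元素，压缩vj
--     :param vi:
--     :param vj:
--     :param unneed_j:
--     :return: 旧的j原来的位置
--     """
--     oldj_newj = {}
--     count = 0
--     new_value=[]
--     # 为每一个j分配新的位置
--     for i in range(len(vi)):
--         if vj[i] not in unneed_j and vj[i] not in oldj_newj.keys():
--             oldj_newj[vj[i]] = count
--             count += 1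
--     j_new = []
--     i_new = []
--     for i in range(len(vi)):
--         if vj[i] in oldj_newj.keys():
--             j_new.append(oldj_newj[vj[i]])
--             i_new.append(vi[i])
--             new_value.append(value[i])
--     return i_new, j_new, oldj_newj,new_value
-- ===== SOURCE B (Python) =====
-- def simplify_value(vi, vj, unneed_j, value):
--     unneeded = set(unneed_j)
--     oldj_newj = {}
--     i_new, j_new, new_value = [], [], []
--     for a, b, v in zip(vi, vj, value):
--         if b in unneeded:
--             continue
--         if b not in oldj_newj:
--             oldj_newj[b] = len(oldj_newj)
--         j_new.append(oldj_newj[b])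
--         i_new.append(a)
--         new_value.append(v)
--     return i_new, j_new, oldj_newj, new_value
-- ===== Notes on version B (the rewrite author's own statement) =====
-- stated objective: alternative
-- what changed: B fuses A's two index loops into a single pass over zip(vi, vj, value) that builds the first-appearance index map and the three output lists together, testing unneed_j via a set instead of repeated list scans.
import Mathlib
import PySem

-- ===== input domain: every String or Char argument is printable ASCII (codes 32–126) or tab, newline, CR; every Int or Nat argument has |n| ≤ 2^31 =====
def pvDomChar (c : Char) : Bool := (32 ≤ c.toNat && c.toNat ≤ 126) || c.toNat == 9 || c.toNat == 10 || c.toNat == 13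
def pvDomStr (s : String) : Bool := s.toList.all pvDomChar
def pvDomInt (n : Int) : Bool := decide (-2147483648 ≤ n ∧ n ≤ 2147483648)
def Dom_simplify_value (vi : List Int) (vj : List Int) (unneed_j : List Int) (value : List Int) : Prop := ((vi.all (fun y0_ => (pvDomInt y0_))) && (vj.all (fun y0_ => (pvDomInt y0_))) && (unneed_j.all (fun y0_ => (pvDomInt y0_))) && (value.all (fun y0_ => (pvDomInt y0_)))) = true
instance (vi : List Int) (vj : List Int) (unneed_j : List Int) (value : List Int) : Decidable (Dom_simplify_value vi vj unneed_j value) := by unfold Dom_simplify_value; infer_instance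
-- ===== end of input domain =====

-- B fuses A's two index loops into one pass over zip(vi, vj, value) with a set for unneed_j;
-- same return value on all inputs where A returns (objective: alternative decomposition).

-- ===== PORT A =====
def simplify_value (vi : List Int) (vj : List Int) (unneed_j : List Int) (value : List Int) : List Int × List Int × (List (Int × Int)) × List Int :=
  -- first loop: assign each needed j a new position, in order of first appearance
  let s1 : PySem.Dict Int Int × Int :=
    (PySem.List.pyRange 0 (vi.length : Int) 1).foldl
      (fun st i =>
        if !unneed_j.contains (PySem.List.pyGetD vj i 0)
            && !st.1.contains (PySem.List.pyGetD vj i 0) then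
          (st.1.insert (PySem.List.pyGetD vj i 0) st.2, st.2 + 1)
        else st)
      (PySem.Dict.empty, 0)
  let oldj_newj := s1.1
  -- second loop: rebuild j_new, i_new, new_value (state = (j_new, i_new, new_value))
  let s2 : List Int × List Int × List Int :=
    (PySem.List.pyRange 0 (vi.length : Int) 1).foldl
      (fun st i =>
        if oldj_newj.contains (PySem.List.pyGetD vj i 0) then
          (st.1 ++ [oldj_newj.getD (PySem.List.pyGetD vj i 0) 0],
           st.2.1 ++ [PySem.List.pyGetD vi i 0],
           st.2.2 ++ [PySem.List.pyGetD value i 0])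
        else st)
      ([], [], [])
  (s2.2.1, s2.1, oldj_newj.items, s2.2.2)

-- ===== PORT B =====
def simplify_value_alt (vi : List Int) (vj : List Int) (unneed_j : List Int) (value : List Int) : List Int × List Int × (List (Int × Int)) × List Int :=
  let unneeded : PySem.Set Int := PySem.Set.ofList unneed_j
  -- one pass over the zipped triples (state = (oldj_newj, j_new, i_new, new_value))
  let st : PySem.Dict Int Int × List Int × List Int × List Int :=
    (vi.zip (vj.zip value)).foldl
      (fun st t =>
        if unneeded.contains t.2.1 then st
        else
          let d := if st.1.contains t.2.1 then st.1 else st.1.insert t.2.1 (st.1.size : Int)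
          (d, st.2.1 ++ [d.getD t.2.1 0], st.2.2.1 ++ [t.1], st.2.2.2 ++ [t.2.2]))
      (PySem.Dict.empty, [], [], [])
  (st.2.2.1, st.2.1, st.1.items, st.2.2.2)

-- ===== PRECONDITION & SPEC =====
-- Pre_ is exactly where A returns: A raises IndexError on vj[i] when len(vj) < len(vi),
-- and on value[i] when some kept index i (vj[i] not in unneed_j) has i >= len(value).
def Pre_simplify_value (vi : List Int) (vj : List Int) (unneed_j : List Int) (value : List Int) : Prop :=
  vi.length ≤ vj.length ∧ ∀ i < vi.length, vj.getD i 0 ∉ unneed_j → i < value.length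
instance (vi : List Int) (vj : List Int) (unneed_j : List Int) (value : List Int) : Decidable (Pre_simplify_value vi vj unneed_j value) := by unfold Pre_simplify_value; infer_instance
def pvWitness_simplify_value : List Int × List Int × List Int × List Int := ([1, 2, 3], [5, 6, 5], [6], [10, 20, 30])

def Spec_simplify_value (vi : List Int) (vj : List Int) (unneed_j : List Int) (value : List Int) (out : List Int × List Int × (List (Int × Int)) × List Int) : Prop := out = simplify_value_alt vi vj unneed_j value
instance (vi : List Int) (vj : List Int) (unneed_j : List Int) (value : List Int) (out : List Int × List Int × (List (Int × Int)) × List Int) : Decidable (Spec_simplify_value vi vj unneed_j value out) := by unfold Spec_simplify_value; infer_instance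

-- ===== CLAIM (what is proved, stated in full; the proofs are below) =====
def Claim_equal_simplify_value : Prop := ∀ (vi : List Int) (vj : List Int) (unneed_j : List Int) (value : List Int), Dom_simplify_value vi vj unneed_j value → Pre_simplify_value vi vj unneed_j value → Spec_simplify_value vi vj unneed_j value (simplify_value vi vj unneed_j value)

-- ===== LEMMAS AND PROOFS =====

-- the list of index triples (vi[k], vj[k], value[k]) for k < n, with getD padding
def svMap (vi vj value : List Int) (n : Nat) : List (Int × Int × Int) :=
  (List.range n).map (fun k => (vi.getD k 0, vj.getD k 0, value.getD k 0))

-- dict-only step of A's first loop / of the fused loop (the new index is the current size)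
def svF (un : List Int) (d : PySem.Dict Int Int) (t : Int × Int × Int) : PySem.Dict Int Int :=
  if !un.contains t.2.1 && !d.contains t.2.1 then d.insert t.2.1 (d.size : Int) else d

def svD (un : List Int) (L : List (Int × Int × Int)) (d : PySem.Dict Int Int) : PySem.Dict Int Int :=
  L.foldl (svF un) d

-- step of A's second loop, reading the finished dict D
def svG (D : PySem.Dict Int Int) (st : List Int × List Int × List Int) (t : Int × Int × Int) : List Int × List Int × List Int :=
  if D.contains t.2.1 then (st.1 ++ [D.getD t.2.1 0], st.2.1 ++ [t.1], st.2.2 ++ [t.2.2]) else st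

-- step of the fused loop
def svH (un : List Int) (st : PySem.Dict Int Int × List Int × List Int × List Int) (t : Int × Int × Int) : PySem.Dict Int Int × List Int × List Int × List Int :=
  if un.contains t.2.1 then st
  else
    let d := if st.1.contains t.2.1 then st.1 else st.1.insert t.2.1 (st.1.size : Int)
    (d, st.2.1 ++ [d.getD t.2.1 0], st.2.2.1 ++ [t.1], st.2.2.2 ++ [t.2.2])

-- A restated over the triple list (same steps; pyRange/pyGetD unfolded by definitional rewriting)
def svA (vi vj un value : List Int) : List Int × List Int × (List (Int × Int)) × List Int :=
  let T := svMap vi vj value vi.length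
  let s1 := T.foldl (fun st t => if !un.contains t.2.1 && !st.1.contains t.2.1 then (st.1.insert t.2.1 st.2, st.2 + 1) else st) ((PySem.Dict.empty : PySem.Dict Int Int), (0 : Int))
  let s2 := T.foldl (svG s1.1) ([], [], [])
  (s2.2.1, s2.1, s1.1.items, s2.2.2)

theorem contains_ofList_eq (xs : List Int) (b : Int) : (PySem.Set.ofList xs).contains b = xs.contains b := by
  by_cases h : b ∈ xs <;>
    simp [PySem.Set.mem_ofList, h]

theorem svD_nil (un : List Int) (d : PySem.Dict Int Int) : svD un [] d = d := rfl

theorem svD_cons (un : List Int) (t : Int × Int × Int) (L : List (Int × Int × Int)) (d : PySem.Dict Int Int) :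
    svD un (t :: L) d = svD un L (svF un d t) := rfl

theorem svD_append (un : List Int) (L T' : List (Int × Int × Int)) (d : PySem.Dict Int Int) :
    svD un (L ++ T') d = svD un T' (svD un L d) := by
  unfold svD; rw [List.foldl_append]

theorem portA_eq (vi vj un value : List Int) : simplify_value vi vj un value = svA vi vj un value := by
  unfold simplify_value svA svMap svG
  rw [PySem.List.pyRange_zero_natCast]
  simp only [List.foldl_map, PySem.List.pyGetD_natCast]

theorem portB_eq (vi vj un value : List Int) :
    simplify_value_alt vi vj un value =
      (let st := (vi.zip (vj.zip value)).foldl (svH un) ((PySem.Dict.empty : PySem.Dict Int Int), [], [], [])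
       (st.2.2.1, st.2.1, st.1.items, st.2.2.2)) := by
  unfold simplify_value_alt svH
  simp only [contains_ofList_eq]

-- one svF step: facts used by the induction proofs
theorem svF_contains_mono (un : List Int) (d : PySem.Dict Int Int) (t : Int × Int × Int) (k : Int)
    (h : d.contains k = true) : (svF un d t).contains k = true := by
  unfold svF; split
  · simp [PySem.Dict.contains_insert, h]
  · exact h

theorem svF_getD_stable (un : List Int) (d : PySem.Dict Int Int) (t : Int × Int × Int) (k x : Int)
    (h : d.contains k = true) : (svF un d t).getD k x = d.getD k x := by
  unfold svF; split
  · next hc =>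
    rw [Bool.and_eq_true, Bool.not_eq_true', Bool.not_eq_true'] at hc
    have hne : k ≠ t.2.1 := by
      intro he
      have h2 := hc.2
      rw [← he, h] at h2
      simp at h2
    exact PySem.Dict.getD_insert_of_ne _ _ _ hne
  · rfl

theorem svF_contains_false (un : List Int) (d : PySem.Dict Int Int) (t : Int × Int × Int) (k : Int)
    (hu : un.contains k = true) (h : d.contains k = false) : (svF un d t).contains k = false := by
  unfold svF; split
  · next hc =>
    rw [Bool.and_eq_true, Bool.not_eq_true', Bool.not_eq_true'] at hc
    have hne : (k == t.2.1) = false := by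
      rw [beq_eq_false_iff_ne]
      intro he; rw [he, hc.1] at hu; simp at hu
    rw [PySem.Dict.contains_insert, hne, Bool.false_or]
    exact h
  · exact h

-- A's first loop tracks (dict, count) with count = dict.size
theorem svD_pair (un : List Int) (L : List (Int × Int × Int)) (d : PySem.Dict Int Int) :
    L.foldl (fun st t => if !un.contains t.2.1 && !st.1.contains t.2.1 then (st.1.insert t.2.1 st.2, st.2 + 1) else st)
      (d, (d.size : Int))
      = (svD un L d, ((svD un L d).size : Int)) := by
  induction L generalizing d with
  | nil => rfl
  | cons t L ih =>
    rw [List.foldl_cons, svD_cons]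
    by_cases hc : (!un.contains t.2.1 && !d.contains t.2.1) = true
    · rw [if_pos hc]
      have hdc : d.contains t.2.1 = false := by
        rw [Bool.and_eq_true, Bool.not_eq_true', Bool.not_eq_true'] at hc
        exact hc.2
      have hsz : (d.size : Int) + 1 = (((d.insert t.2.1 (d.size : Int)).size : Nat) : Int) := by
        rw [PySem.Dict.size_insert, if_neg (by rw [hdc]; exact Bool.false_ne_true)]
        push_cast; ring
      rw [hsz]
      rw [show svF un d t = d.insert t.2.1 ((d.size : Nat) : Int) from by unfold svF; rw [if_pos hc]]
      exact ih _
    · rw [if_neg hc, show svF un d t = d from by unfold svF; rw [if_neg hc]]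
      exact ih d

theorem svD_contains_mono (un : List Int) (L : List (Int × Int × Int)) (d : PySem.Dict Int Int) (k : Int)
    (h : d.contains k = true) : (svD un L d).contains k = true := by
  induction L generalizing d with
  | nil => rw [svD_nil]; exact h
  | cons t L ih => rw [svD_cons]; exact ih _ (svF_contains_mono un d t k h)

theorem svD_getD_stable (un : List Int) (L : List (Int × Int × Int)) (d : PySem.Dict Int Int) (k x : Int)
    (h : d.contains k = true) : (svD un L d).getD k x = d.getD k x := by
  induction L generalizing d with
  | nil => rw [svD_nil]
  | cons t L ih =>
    rw [svD_cons, ih _ (svF_contains_mono un d t k h)]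
    exact svF_getD_stable un d t k x h

theorem svD_unneed_absent (un : List Int) (L : List (Int × Int × Int)) (d : PySem.Dict Int Int) (k : Int)
    (hu : un.contains k = true) (h : d.contains k = false) : (svD un L d).contains k = false := by
  induction L generalizing d with
  | nil => rw [svD_nil]; exact h
  | cons t L ih => rw [svD_cons]; exact ih _ (svF_contains_false un d t k hu h)

-- the fused loop = (final dict, A's second loop run with the final dict)
theorem svH_eq_svG (un : List Int) (L : List (Int × Int × Int)) (d : PySem.Dict Int Int)
    (acc : List Int × List Int × List Int)
    (hinv : ∀ k, un.contains k = true → d.contains k = false) :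
    L.foldl (svH un) (d, acc.1, acc.2.1, acc.2.2)
      = (svD un L d, (L.foldl (svG (svD un L d)) acc).1, (L.foldl (svG (svD un L d)) acc).2.1, (L.foldl (svG (svD un L d)) acc).2.2) := by
  induction L generalizing d acc with
  | nil => rw [svD_nil]; rfl
  | cons t L ih =>
    simp only [List.foldl_cons]
    by_cases hu : un.contains t.2.1 = true
    · have hum : t.2.1 ∈ un := by simpa using hu
      have hskip : svF un d t = d := by simp [svF, hum]
      have hDeq : svD un (t :: L) d = svD un L d := by rw [svD_cons, hskip]
      have hDc : (svD un (t :: L) d).contains t.2.1 = false := by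
        rw [hDeq]; exact svD_unneed_absent un L d _ hu (hinv _ hu)
      have hH : svH un (d, acc.1, acc.2.1, acc.2.2) t = (d, acc.1, acc.2.1, acc.2.2) := by
        simp [svH, hum]
      have hG : svG (svD un (t :: L) d) acc t = acc := by
        simp [svG, hDc]
      rw [hH, hG, hDeq]
      exact ih d acc hinv
    · have hu' : un.contains t.2.1 = false := by rwa [Bool.not_eq_true] at hu
      have hum : t.2.1 ∉ un := by simpa using hu'
      have hF : svH un (d, acc.1, acc.2.1, acc.2.2) t
          = (svF un d t, acc.1 ++ [(svF un d t).getD t.2.1 0], acc.2.1 ++ [t.1], acc.2.2 ++ [t.2.2]) := by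
        by_cases hc : d.contains t.2.1 = true <;> simp [svH, svF, hum, hc]
      have hc1 : (svF un d t).contains t.2.1 = true := by
        by_cases hc : d.contains t.2.1 = true
        · simp [svF, hum, hc]
        · simp [svF, hum, hc]
      have hinv1 : ∀ k, un.contains k = true → (svF un d t).contains k = false := by
        intro k hk
        have hne : k ≠ t.2.1 := by
          intro he; rw [he, hu'] at hk; simp at hk
        by_cases hc : d.contains t.2.1 = true <;>
          simp [svF, hum, hc, PySem.Dict.contains_insert, hne, hinv k hk]
      have hDeq : svD un (t :: L) d = svD un L (svF un d t) := svD_cons un t L d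
      have hDc : (svD un (t :: L) d).contains t.2.1 = true := by
        rw [hDeq]; exact svD_contains_mono un L _ _ hc1
      have hDg : (svD un (t :: L) d).getD t.2.1 0 = (svF un d t).getD t.2.1 0 := by
        rw [hDeq]; exact svD_getD_stable un L _ _ _ hc1
      have hG : svG (svD un (t :: L) d) acc t
          = (acc.1 ++ [(svF un d t).getD t.2.1 0], acc.2.1 ++ [t.1], acc.2.2 ++ [t.2.2]) := by
        unfold svG; rw [if_pos hDc, hDg]
      rw [hF, hG, hDeq]
      exact ih (svF un d t) (acc.1 ++ [(svF un d t).getD t.2.1 0], acc.2.1 ++ [t.1], acc.2.2 ++ [t.2.2]) hinv1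

-- folds skip a block of unneeded triples
theorem svD_skip (un : List Int) (tail : List (Int × Int × Int)) (d : PySem.Dict Int Int)
    (h : ∀ t ∈ tail, un.contains t.2.1 = true) : svD un tail d = d := by
  induction tail with
  | nil => rfl
  | cons t tail ih =>
    rw [svD_cons, show svF un d t = d from by unfold svF; rw [h t (by simp)]; rfl]
    exact ih (fun s hs => h s (by simp [hs]))

theorem svG_skip (D : PySem.Dict Int Int) (tail : List (Int × Int × Int))
    (acc : List Int × List Int × List Int)
    (h : ∀ t ∈ tail, D.contains t.2.1 = false) :
    tail.foldl (svG D) acc = acc := by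
  induction tail generalizing acc with
  | nil => rfl
  | cons t tail ih =>
    rw [List.foldl_cons,
      show svG D acc t = acc from by simp [svG, h t (by simp)]]
    exact ih acc (fun s hs => h s (by simp [hs]))

-- zip of the three lists = the triple list truncated at the shortest length
theorem zip3_eq_svMap (vi vj value : List Int) :
    vi.zip (vj.zip value) = svMap vi vj value (min vi.length (min vj.length value.length)) := by
  apply List.ext_getElem
  · simp [svMap]
  · intro i h1 h2
    simp only [svMap, List.getElem_map, List.getElem_range, List.getElem_zip]
    simp only [List.length_zip] at h1
    rw [List.getD_eq_getElem _ _ (by omega), List.getD_eq_getElem _ _ (by omega), List.getD_eq_getElem _ _ (by omega)]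

-- the triple list splits at m
theorem svMap_split (vi vj value : List Int) (m n : Nat) (h : m ≤ n) :
    svMap vi vj value n = svMap vi vj value m ++ (List.range (n - m)).map (fun j => (vi.getD (m + j) 0, vj.getD (m + j) 0, value.getD (m + j) 0)) := by
  unfold svMap
  conv_lhs => rw [show n = m + (n - m) from by omega]
  rw [List.range_add, List.map_append, List.map_map]
  rfl

-- the first loop from the empty dict (0 = empty.size)
theorem svD_pair0 (un : List Int) (L : List (Int × Int × Int)) :
    L.foldl (fun st t => if !un.contains t.2.1 && !st.1.contains t.2.1 then (st.1.insert t.2.1 st.2, st.2 + 1) else st)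
      ((PySem.Dict.empty : PySem.Dict Int Int), (0 : Int))
      = (svD un L PySem.Dict.empty, ((svD un L PySem.Dict.empty).size : Int)) := by
  have h := svD_pair un L PySem.Dict.empty
  rw [PySem.Dict.size_empty] at h
  exact_mod_cast h

-- ===== VERDICT (by name: the statement is the Claim_ definition above) =====
theorem simplify_value_spec : Claim_equal_simplify_value := by
  intro vi vj unneed_j value _ hpre
  obtain ⟨hlen, hval⟩ := hpre
  unfold Spec_simplify_value
  rw [portA_eq, portB_eq]
  have hm : min vi.length (min vj.length value.length) ≤ vi.length := by omega
  -- every triple of the tail beyond the zip length has its j in unneed_j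
  have htail : ∀ t ∈ (List.range (vi.length - min vi.length (min vj.length value.length))).map
      (fun j => (vi.getD (min vi.length (min vj.length value.length) + j) 0,
                 vj.getD (min vi.length (min vj.length value.length) + j) 0,
                 value.getD (min vi.length (min vj.length value.length) + j) 0)),
      unneed_j.contains t.2.1 = true := by
    intro t ht
    rcases List.mem_map.mp ht with ⟨j, hj, rfl⟩
    rw [List.mem_range] at hj
    have hmv : min vi.length (min vj.length value.length) = value.length := by omega
    have hmem : vj.getD (min vi.length (min vj.length value.length) + j) 0 ∈ unneed_j := by
      by_contra hno
      have := hval _ (by omega) hno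
      omega
    simpa using hmem
  have hsplit := svMap_split vi vj value _ _ hm
  have hzip := zip3_eq_svMap vi vj value
  -- names for the two stages over the zipped prefix
  have hDc_tail : ∀ t ∈ (List.range (vi.length - min vi.length (min vj.length value.length))).map
      (fun j => (vi.getD (min vi.length (min vj.length value.length) + j) 0,
                 vj.getD (min vi.length (min vj.length value.length) + j) 0,
                 value.getD (min vi.length (min vj.length value.length) + j) 0)),
      (svD unneed_j (svMap vi vj value (min vi.length (min vj.length value.length))) PySem.Dict.empty).contains t.2.1 = false := by
    intro t ht
    exact svD_unneed_absent _ _ _ _ (htail t ht) (PySem.Dict.contains_empty _)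
  simp only [svA]
  rw [svD_pair0, hsplit, svD_append, svD_skip _ _ _ htail]
  rw [List.foldl_append, svG_skip _ _ _ hDc_tail]
  rw [hzip]
  rw [svH_eq_svG unneed_j _ PySem.Dict.empty ([], [], []) (fun k _ => PySem.Dict.contains_empty k)]
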